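-- pv_equiv track=rewrite | github.com/zerohoon0102/Algorithm | programmers/coding64061.py | solution
-- ===== SOURCE A (Python) =====
-- def solution(board, moves):
--     answer = 0
--     backet = []
--     len_board = len(board)
--     last = 1
--     height = [-1] * len_board
--     while len_board - last >= 0:
--         for a in range(0, len_board):
--             if height[a] == -1:
--                 if board[len_board - last][a] == 0:
--                     height[a] = len_board - last + 1
--                 if len_board - last == 0 and board[len_board - last][a] != 0:
--                     height[a] = 0
--         last += 1
--     for choice in moves:
--         if height[choice-1] != len_board:
--             if len(backet) == 0:
--                 backet.append(board[height[choice-1]][choice-1])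
--             elif len(backet) != 0:
--                 if backet[len(backet) - 1] == board[height[choice-1]][choice-1]:
--                     answer = answer + 2
--                     backet.pop()
--                 else:
--                     backet.append(board[height[choice-1]][choice-1])
--             height[choice - 1] += 1
--
--     return answer
-- ===== SOURCE B (Python) =====
-- def column_stack(board, n, a):
--     # Dolls the crane can reach in column a, top to bottom: the maximal run of
--     # non-zero entries at the bottom of the column (a zero cuts off what is above).
--     stack = []
--     for r in range(n):
--         v = board[r][a]
--         if v == 0:
--             stack = []
--         else:
--             stack.append(v)
--     return stack
--
-- def solution(board, moves):
--     n = len(board)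
--     cols = [column_stack(board, n, a) for a in range(n)]
--     answer = 0
--     basket = []
--     for m in moves:
--         stack = cols[m - 1]
--         if stack:
--             doll = stack.pop(0)
--             if basket and basket[-1] == doll:
--                 basket.pop()
--                 answer += 2
--             else:
--                 basket.append(doll)
--     return answer
-- ===== Notes on version B (the rewrite author's own statement) =====
-- stated objective: idiomatic
-- what changed: B replaces A's bottom-up sentinel scan that leaves a mutable per-column height pointer (and repeated board[height][col] lookups during the move loop) by a one-shot transpose into per-column stacks of reachable dolls, after which each move just pops the front of its column's stack.
-- outside the precondition, e.g. on solution([[1, 2, 9], [3, 4, 9]], [0, 0]): A returns 2, B returns 0; on solution([[7], [0, 0]], [1]): A returns 0, B raises IndexError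
import Mathlib
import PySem

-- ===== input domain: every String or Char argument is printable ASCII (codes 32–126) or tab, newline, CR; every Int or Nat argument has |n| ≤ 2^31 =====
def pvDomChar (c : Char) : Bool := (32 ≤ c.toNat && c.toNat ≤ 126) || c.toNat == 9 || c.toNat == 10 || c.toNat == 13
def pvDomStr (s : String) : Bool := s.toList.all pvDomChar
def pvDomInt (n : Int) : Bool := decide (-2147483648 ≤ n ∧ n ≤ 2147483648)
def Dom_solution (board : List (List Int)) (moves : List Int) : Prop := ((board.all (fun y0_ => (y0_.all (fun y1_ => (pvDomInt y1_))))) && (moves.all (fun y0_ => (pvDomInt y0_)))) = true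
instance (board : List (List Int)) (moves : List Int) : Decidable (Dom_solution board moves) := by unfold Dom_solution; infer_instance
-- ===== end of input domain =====

-- B replaces A's bottom-up sentinel scan with per-column stacks of reachable dolls
-- (built once, no board mutation; A does not mutate its arguments either) — objective: idiomatic.

-- board[r][a] with Python indexing; the defaults are unreachable under Pre_solution.
def pvGet2 (board : List (List Int)) (r a : Int) : Int :=
  PySem.List.pyGetD (PySem.List.pyGetD board r []) a 0

-- ===== PORT A =====
def solution (board : List (List Int)) (moves : List Int) : Int :=
  let n : Int := board.length
  -- while len_board - last >= 0 with last = 1, 2, …  ⇒  last runs over range(1, n+1)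
  let height1 : List Int :=
    (PySem.List.pyRange 1 (n + 1) 1).foldl (fun height last =>
      (PySem.List.pyRange 0 n 1).foldl (fun h a =>
        if PySem.List.pyGetD h a 0 = -1 then
          let h' := if pvGet2 board (n - last) a = 0 then
                      PySem.List.pySetD h a (n - last + 1) else h
          if n - last = 0 ∧ pvGet2 board (n - last) a ≠ 0 then
            PySem.List.pySetD h' a 0 else h'
        else h) height)
      (List.replicate board.length (-1))
  (moves.foldl (fun (st : Int × List Int × List Int) choice =>
      let hc := PySem.List.pyGetD st.2.2 (choice - 1) 0
      if hc ≠ n then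
        let doll := pvGet2 board hc (choice - 1)
        let ab :=
          if st.2.1.length = 0 then (st.1, st.2.1 ++ [doll])
          else if PySem.List.pyGetD st.2.1 ((st.2.1.length : Int) - 1) 0 = doll then
            (st.1 + 2, st.2.1.dropLast)
          else (st.1, st.2.1 ++ [doll])
        (ab.1, ab.2, PySem.List.pySetD st.2.2 (choice - 1) (hc + 1))
      else st)
    ((0 : Int), ([], height1))).1

-- ===== PORT B =====
def pvColStack (board : List (List Int)) (n : Nat) (a : Nat) : List Int :=
  (List.range n).foldl (fun stack (r : Nat) =>
    let v := pvGet2 board (r : Int) (a : Int)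
    if v = 0 then [] else stack ++ [v]) []

def solution_alt (board : List (List Int)) (moves : List Int) : Int :=
  let n := board.length
  let cols : List (List Int) := (List.range n).map (fun a => pvColStack board n a)
  (moves.foldl (fun (st : Int × List Int × List (List Int)) m =>
      match PySem.List.pyGetD st.2.2 (m - 1) [] with
      | [] => st
      | d :: rest =>
        let cols' := PySem.List.pySetD st.2.2 (m - 1) rest
        if st.2.1.getLast? = some d then (st.1 + 2, st.2.1.dropLast, cols')
        else (st.1, st.2.1 ++ [d], cols'))
    ((0 : Int), ([], cols))).1

-- ===== PRECONDITION & SPEC =====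
-- Pre_ keeps every input where A returns the value the claim is about: each of the n rows has
-- at least n entries, every move is in [1-n, n] (outside, A raises IndexError), and when a
-- non-positive move is present (Python negative indexing) the board must be exactly square —
-- on longer rows such a move makes A mix one column's height with another column's dolls, and
-- a short row hidden below a zero may be skipped by A's lazy scan but is read by B (cites).
def Pre_solution (board : List (List Int)) (moves : List Int) : Prop :=
  (∀ row ∈ board, board.length ≤ row.length) ∧
  (∀ m ∈ moves, 1 - (board.length : Int) ≤ m ∧ m ≤ (board.length : Int)) ∧
  ((∃ m ∈ moves, m ≤ 0) → ∀ row ∈ board, row.length = board.length)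
instance (board : List (List Int)) (moves : List Int) : Decidable (Pre_solution board moves) := by
  unfold Pre_solution; infer_instance

def pvWitness_solution : List (List Int) × List Int := ([[0, 0], [1, 2]], [1, 2])

def Spec_solution (board : List (List Int)) (moves : List Int) (out : Int) : Prop :=
  out = solution_alt board moves
instance (board : List (List Int)) (moves : List Int) (out : Int) :
    Decidable (Spec_solution board moves out) := by unfold Spec_solution; infer_instance

-- ===== CLAIM (what is proved, stated in full; the proofs are below) =====
def Claim_equal_solution : Prop := ∀ (board : List (List Int)) (moves : List Int),
  Dom_solution board moves → Pre_solution board moves →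
  Spec_solution board moves (solution board moves)

-- ===== LEMMAS AND PROOFS =====

def pvSfold (l : List Int) : List Int :=
  l.foldl (fun s v => if v = 0 then [] else s ++ [v]) []

def pvHcol (c : List Int) : Nat → Int
  | 0 => -1
  | t + 1 =>
    let x := pvHcol c t
    if x = -1 then
      let r := c.length - 1 - t
      if c.getD r 0 = 0 then ((r : Nat) : Int) + 1
      else if r = 0 then 0 else -1
    else x

def pvCol (board : List (List Int)) (j : Nat) : List Int :=
  (List.range board.length).map (fun (r : Nat) => pvGet2 board (r : Int) (j : Int))

lemma pvSfold_append (l : List Int) (v : Int) :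
    pvSfold (l ++ [v]) = if v = 0 then [] else pvSfold l ++ [v] := by
  simp [pvSfold, List.foldl_append]
lemma pvSfold_spec (l : List Int) :
    (pvSfold l).length ≤ l.length ∧
    l.drop (l.length - (pvSfold l).length) = pvSfold l ∧
    (∀ v ∈ pvSfold l, v ≠ 0) ∧
    (l.length - (pvSfold l).length = 0 ∨ l.getD (l.length - (pvSfold l).length - 1) 0 = 0) := by
  induction l using List.reverseRecOn with
  | nil => simp [pvSfold]
  | append_singleton l v ih =>
    obtain ⟨h1, h2, h3, h4⟩ := ih
    rw [pvSfold_append]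
    by_cases hv : v = 0
    · subst hv
      refine ⟨by simp, by simp, by simp, Or.inr ?_⟩
      simp [List.getD]
    · simp only [if_neg hv]
      have hk : (l ++ [v]).length - (pvSfold l ++ [v]).length = l.length - (pvSfold l).length := by
        simp
      refine ⟨by simpa using h1, ?_, ?_, ?_⟩
      · rw [hk, List.drop_append_of_le_length (by omega), h2]
      · intro x hx
        rcases List.mem_append.1 hx with h | h
        · exact h3 x h
        · simp at h; subst h; exact hv
      · rw [hk]
        rcases Nat.eq_zero_or_pos (l.length - (pvSfold l).length) with h0 | h0
        · exact Or.inl h0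
        · rcases h4 with h | h
          · omega
          · right
            rw [List.getD_append l [v] 0 _ (by omega)]
            exact h

-- entries at positions ≥ k are non-zero
lemma pvSfold_nonzero (c : List Int) (r : Nat) (hr : r < c.length)
    (hk : c.length - (pvSfold c).length ≤ r) : c.getD r 0 ≠ 0 := by
  obtain ⟨h1, h2, h3, _⟩ := pvSfold_spec c
  set k := c.length - (pvSfold c).length with hkdef
  apply h3
  rw [← h2]
  have hlt : r - k < (c.drop k).length := by simp; omega
  have hget : (c.drop k).getD (r - k) 0 = c.getD r 0 := by
    rw [List.getD_eq_getElem _ _ hlt, List.getD_eq_getElem _ _ hr]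
    simp [List.getElem_drop]
    congr 1
    omega
  rw [← hget, List.getD_eq_getElem _ _ hlt]
  exact List.getElem_mem hlt

lemma pvHcol_eq (c : List Int) (hc : 0 < c.length) (t : Nat) (ht : t ≤ c.length) :
    pvHcol c t =
      if 0 < c.length - (pvSfold c).length ∧
         c.length - t ≤ c.length - (pvSfold c).length - 1 then
        ((c.length - (pvSfold c).length : Nat) : Int)
      else if c.length - (pvSfold c).length = 0 ∧ t = c.length then 0 else -1 := by
  obtain ⟨h1, h2, h3, h4⟩ := pvSfold_spec c
  set k := c.length - (pvSfold c).length with hkdef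
  induction t with
  | zero =>
    rw [if_neg (by omega), if_neg (by omega)]
    rfl
  | succ t ih =>
    have ih := ih (by omega)
    set r : Nat := c.length - 1 - t with hrdef
    have hrlt : r < c.length := by omega
    by_cases hcase : 0 < k ∧ c.length - t ≤ k - 1
    · rw [pvHcol]
      rw [ih, if_pos hcase]
      have hne : ((k : Nat) : Int) ≠ -1 := by omega
      simp only [if_neg hne]
      rw [if_pos (show 0 < k ∧ c.length - (t + 1) ≤ k - 1 from ⟨hcase.1, by omega⟩)]
    · have hx : pvHcol c t = -1 := by
        rw [ih, if_neg hcase, if_neg (by omega)]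
      rw [pvHcol]
      simp only [hx]
      by_cases hz : c.getD r 0 = 0
      · have hrk : r < k := by
          by_contra hge
          exact pvSfold_nonzero c r hrlt (by omega) hz
        have hkub : k ≤ c.length - t := by
          by_contra hgt
          exact hcase ⟨by omega, by omega⟩
        have hreq : k = r + 1 := by omega
        rw [if_pos hz,
          if_pos (show 0 < k ∧ c.length - (t + 1) ≤ k - 1 from ⟨by omega, by omega⟩)]
        push_cast
        omega
      · rw [if_neg hz]
        by_cases hr0 : r = 0
        · have ht1 : t + 1 = c.length := by omega
          have hk0 : k = 0 := by
            by_contra hkne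
            have hkub : k ≤ c.length - t := by
              by_contra hgt
              exact hcase ⟨by omega, by omega⟩
            have hk1 : k = 1 := by omega
            rcases h4 with h | h
            · omega
            · exact hz (by rw [hr0]; rw [hk1] at h; simpa using h)
          rw [if_pos hr0, if_neg (show ¬(0 < k ∧ c.length - (t + 1) ≤ k - 1) by omega),
            if_pos (show k = 0 ∧ t + 1 = c.length from ⟨hk0, ht1⟩)]
          simp
        · rw [if_neg hr0]
          have hnot : ¬(0 < k ∧ c.length - (t + 1) ≤ k - 1) := by
            rintro ⟨hk0, hle⟩
            have hkub : k ≤ c.length - t := by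
              by_contra hgt
              exact hcase ⟨by omega, by omega⟩
            have hrk : r = k - 1 := by omega
            rcases h4 with h | h
            · omega
            · exact hz (by rw [hrk]; exact h)
          rw [if_neg hnot, if_neg (show ¬(k = 0 ∧ t + 1 = c.length) by omega)]
          simp

lemma pvHcol_final (c : List Int) (hc : 0 < c.length) :
    pvHcol c c.length = ((c.length - (pvSfold c).length : Nat) : Int) := by
  have h := pvHcol_eq c hc c.length le_rfl
  rcases Nat.eq_zero_or_pos (c.length - (pvSfold c).length) with h0 | h0 <;>
    simp [h, h0]

def pvSlot (board : List (List Int)) (row : Int) (j : Nat) (x : Int) : Int :=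
  if x = -1 then
    if pvGet2 board row (j : Int) = 0 then row + 1
    else if row = 0 then 0 else -1
  else x

lemma getD_set_self {α : Type} (l : List α) (i : Nat) (v d : α) (h : i < l.length) :
    (l.set i v)[i]?.getD d = v := by
  simp [h]

lemma getD_set_ne {α : Type} (l : List α) (i j : Nat) (v d : α) (h : i ≠ j) :
    (l.set i v)[j]?.getD d = l[j]?.getD d := by
  simp [h]

lemma pvInner_spec (board : List (List Int)) (row : Int) (m : Nat)
    (hm : m ≤ board.length) (h : List Int) (hlen : h.length = board.length) :
    (((List.range m).foldl (fun h (k : Nat) =>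
        if PySem.List.pyGetD h (k : Int) 0 = -1 then
          let h' := if pvGet2 board row (k : Int) = 0 then
                      PySem.List.pySetD h (k : Int) (row + 1) else h
          if row = 0 ∧ pvGet2 board row (k : Int) ≠ 0 then
            PySem.List.pySetD h' (k : Int) 0 else h'
        else h) h).length = board.length) ∧
    (∀ j, j < board.length →
      ((List.range m).foldl (fun h (k : Nat) =>
        if PySem.List.pyGetD h (k : Int) 0 = -1 then
          let h' := if pvGet2 board row (k : Int) = 0 then
                      PySem.List.pySetD h (k : Int) (row + 1) else h
          if row = 0 ∧ pvGet2 board row (k : Int) ≠ 0 then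
            PySem.List.pySetD h' (k : Int) 0 else h'
        else h) h)[j]?.getD 0 =
        if j < m then pvSlot board row j (h[j]?.getD 0) else h[j]?.getD 0) := by
  induction m with
  | zero => exact ⟨hlen, fun j _ => by simp⟩
  | succ m ih =>
    obtain ⟨ihl, ihg⟩ := ih (by omega)
    rw [List.range_succ, List.foldl_append, List.foldl_cons, List.foldl_nil]
    set hm' := (List.range m).foldl _ h with hmdef
    have hx : PySem.List.pyGetD hm' (m : Int) 0 = hm'[m]?.getD 0 := by
      simp [List.getD]
    have hsets : ∀ (l : List Int) (v : Int), PySem.List.pySetD l (m : Int) v = l.set m v :=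
      fun l v => by simp
    have hgm : hm'[m]?.getD 0 = h[m]?.getD 0 := by rw [ihg m (by omega)]; simp
    simp only [hx, hsets]
    constructor
    · split_ifs <;> simp [ihl]
    · intro j hj
      by_cases hjm : j = m
      · subst hjm
        rw [if_pos (Nat.lt_succ_self j)]
        have hl1 : j < hm'.length := ihl ▸ hj
        have hl2 : ∀ v : Int, j < (hm'.set j v).length := fun v => by simpa using hl1
        by_cases hr : row = 0
        · subst hr
          by_cases hc : hm'[j]?.getD 0 = (-1 : Int)
          · by_cases hz : pvGet2 board 0 (j : Int) = 0 <;>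
              simp [hc, hz, pvSlot, ← hgm, getD_set_self _ j _ _ hl1,
                getD_set_self _ j _ _ (hl2 _)]
          · simp only [hx, pvSlot, ← hgm, if_neg hc]
        · by_cases hc : hm'[j]?.getD 0 = (-1 : Int)
          · by_cases hz : pvGet2 board row (j : Int) = 0 <;>
              simp [hc, hz, hr, pvSlot, ← hgm, getD_set_self _ j _ _ hl1,
                getD_set_self _ j _ _ (hl2 _)]
          · simp only [hx, pvSlot, ← hgm, if_neg hc]
      · have hrec := ihg j hj
        have hne : (if j < m + 1 then pvSlot board row j (h[j]?.getD 0) else h[j]?.getD 0)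
            = (if j < m then pvSlot board row j (h[j]?.getD 0) else h[j]?.getD 0) := by
          by_cases hlt : j < m
          · rw [if_pos (by omega), if_pos hlt]
          · rw [if_neg (by omega), if_neg hlt]
        rw [hne, ← hrec]
        by_cases hr : row = 0
        · subst hr
          by_cases hc : hm'[m]?.getD 0 = (-1 : Int) <;>
            by_cases hz : pvGet2 board 0 (m : Int) = 0 <;>
            simp [hc, hz, getD_set_ne _ m j _ _ (by omega)]
        · by_cases hc : hm'[m]?.getD 0 = (-1 : Int) <;>
            by_cases hz : pvGet2 board row (m : Int) = 0 <;>
            simp [hc, hz, hr, getD_set_ne _ m j _ _ (by omega)]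



lemma pvCol_length (board : List (List Int)) (j : Nat) :
    (pvCol board j).length = board.length := by simp [pvCol]

lemma pvCol_getD (board : List (List Int)) (j r : Nat) (hr : r < board.length) :
    (pvCol board j).getD r 0 = pvGet2 board (r : Int) (j : Int) := by
  simp [pvCol, List.getD, hr]

lemma pvSlot_step (board : List (List Int)) (j t : Nat)
    (hj : j < board.length) (ht : t < board.length) (x : Int) :
    pvSlot board ((board.length : Int) - (1 + (t : Int))) j x =
      (fun x =>
        if x = -1 then
          let r := (pvCol board j).length - 1 - t
          if (pvCol board j).getD r 0 = 0 then ((r : Nat) : Int) + 1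
          else if r = 0 then 0 else -1
        else x) x := by
  have hrow : (board.length : Int) - (1 + (t : Int)) = ((board.length - 1 - t : Nat) : Int) := by
    omega
  have hr : board.length - 1 - t < board.length := by omega
  simp only [pvSlot, hrow, pvCol_length, pvCol_getD board j _ hr]
  by_cases hx : x = -1
  · simp only [if_pos hx]
    by_cases hz : pvGet2 board ((board.length - 1 - t : Nat) : Int) (j : Int) = 0
    · simp [hz]
    · simp only [if_neg hz]
      by_cases h0 : board.length - 1 - t = 0
      · rw [if_pos (by exact_mod_cast congrArg (Nat.cast : Nat → Int) h0), if_pos h0]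
      · rw [if_neg (by omega), if_neg h0]
  · simp [hx]

lemma pvOuter_spec (board : List (List Int)) (t : Nat) (ht : t ≤ board.length) :
    (((List.range t).foldl (fun height (k : Nat) =>
        (PySem.List.pyRange 0 (board.length : Int) 1).foldl (fun h a =>
          if PySem.List.pyGetD h a 0 = -1 then
            let h' := if pvGet2 board ((board.length : Int) - (1 + (k : Int))) a = 0 then
                        PySem.List.pySetD h a ((board.length : Int) - (1 + (k : Int)) + 1) else h
            if (board.length : Int) - (1 + (k : Int)) = 0 ∧
               pvGet2 board ((board.length : Int) - (1 + (k : Int))) a ≠ 0 then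
              PySem.List.pySetD h' a 0 else h'
          else h) height)
        (List.replicate board.length (-1))).length = board.length) ∧
    (∀ j, j < board.length →
      ((List.range t).foldl (fun height (k : Nat) =>
        (PySem.List.pyRange 0 (board.length : Int) 1).foldl (fun h a =>
          if PySem.List.pyGetD h a 0 = -1 then
            let h' := if pvGet2 board ((board.length : Int) - (1 + (k : Int))) a = 0 then
                        PySem.List.pySetD h a ((board.length : Int) - (1 + (k : Int)) + 1) else h
            if (board.length : Int) - (1 + (k : Int)) = 0 ∧
               pvGet2 board ((board.length : Int) - (1 + (k : Int))) a ≠ 0 then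
              PySem.List.pySetD h' a 0 else h'
          else h) height)
        (List.replicate board.length (-1)))[j]?.getD 0 = pvHcol (pvCol board j) t) := by
  have hpr : PySem.List.pyRange 0 (board.length : Int) 1
      = (List.range board.length).map (fun (k : Nat) => (k : Int)) := by
    rw [PySem.List.pyRange_one]
    simp only [sub_zero, Int.toNat_natCast, zero_add]
  induction t with
  | zero =>
    refine ⟨by simp, fun j hj => ?_⟩
    simp [pvHcol, List.getD, hj]
  | succ t ih =>
    obtain ⟨ihl, ihg⟩ := ih (by omega)
    rw [List.range_succ, List.foldl_append, List.foldl_cons, List.foldl_nil]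
    set H := (List.range t).foldl _ (List.replicate board.length (-1)) with hH
    rw [hpr, List.foldl_map]
    obtain ⟨hl, hg⟩ := pvInner_spec board ((board.length : Int) - (1 + (t : Int)))
      board.length le_rfl H ihl
    refine ⟨hl, fun j hj => ?_⟩
    rw [hg j hj, if_pos hj, ihg j hj, pvSlot_step board j t hj (by omega)]
    rw [pvHcol]



-- A's basket update, and its reformulation through getLast?
def pvBk (ans : Int) (bk : List Int) (doll : Int) : Int × List Int :=
  if bk.length = 0 then (ans, bk ++ [doll])
  else if PySem.List.pyGetD bk ((bk.length : Int) - 1) 0 = doll then (ans + 2, bk.dropLast)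
  else (ans, bk ++ [doll])

lemma pvBk_eq (ans : Int) (bk : List Int) (d : Int) :
    pvBk ans bk d = if bk.getLast? = some d then (ans + 2, bk.dropLast) else (ans, bk ++ [d]) := by
  rcases List.eq_nil_or_concat' bk with hbk | ⟨L, x, hbk⟩ <;> subst hbk
  · simp [pvBk]
  · have hlast : PySem.List.pyGetD (L ++ [x]) (((L ++ [x]).length : Int) - 1) 0 = x := by
      have h1 : (((L ++ [x]).length : Int) - 1) = ((L.length : Nat) : Int) := by
        simp
      rw [h1, PySem.List.pyGetD_natCast, List.getD, List.getElem?_concat_length]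
      rfl
    rw [pvBk, if_neg (by simp), hlast, List.getLast?_concat]
    simp only [Option.some.injEq]

-- the two move-loop bodies as named functions (definitionally the ports' lambdas)
def pvFoldA (board : List (List Int)) (st : Int × List Int × List Int) (choice : Int) :
    Int × List Int × List Int :=
  let hc := PySem.List.pyGetD st.2.2 (choice - 1) 0
  if hc ≠ (board.length : Int) then
    let doll := pvGet2 board hc (choice - 1)
    let ab :=
      if st.2.1.length = 0 then (st.1, st.2.1 ++ [doll])
      else if PySem.List.pyGetD st.2.1 ((st.2.1.length : Int) - 1) 0 = doll then
        (st.1 + 2, st.2.1.dropLast)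
      else (st.1, st.2.1 ++ [doll])
    (ab.1, ab.2, PySem.List.pySetD st.2.2 (choice - 1) (hc + 1))
  else st

def pvFoldB (board : List (List Int)) (st : Int × List Int × List (List Int)) (m : Int) :
    Int × List Int × List (List Int) :=
  match PySem.List.pyGetD st.2.2 (m - 1) [] with
  | [] => st
  | d :: rest =>
    let cols' := PySem.List.pySetD st.2.2 (m - 1) rest
    if st.2.1.getLast? = some d then (st.1 + 2, st.2.1.dropLast, cols')
    else (st.1, st.2.1 ++ [d], cols')

lemma pvStepA_skip (board : List (List Int)) (ans : Int) (bk : List Int) (hA : List Int)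
    (m : Int) (h1 : PySem.List.pyGetD hA (m - 1) 0 = (board.length : Int)) :
    pvFoldA board (ans, bk, hA) m = (ans, bk, hA) := by
  rw [pvFoldA]
  simp only [h1, ne_eq, not_true_eq_false, if_false]

lemma pvStepA_take (board : List (List Int)) (ans : Int) (bk : List Int) (hA : List Int)
    (m : Int) (kj : Nat) (hk : kj < board.length)
    (h1 : PySem.List.pyGetD hA (m - 1) 0 = (kj : Int)) :
    pvFoldA board (ans, bk, hA) m =
    ((pvBk ans bk (pvGet2 board (kj : Int) (m - 1))).1,
     (pvBk ans bk (pvGet2 board (kj : Int) (m - 1))).2,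
     PySem.List.pySetD hA (m - 1) ((kj : Int) + 1)) := by
  have hne : ((kj : Int) ≠ (board.length : Int)) := by
    intro h; omega
  rw [pvFoldA]
  simp only [h1, ne_eq, hne, not_false_eq_true, if_true, pvBk]

lemma pvStepB_skip (board : List (List Int)) (ans : Int) (bk : List Int) (cB : List (List Int))
    (m : Int) (h1 : PySem.List.pyGetD cB (m - 1) [] = []) :
    pvFoldB board (ans, bk, cB) m = (ans, bk, cB) := by
  rw [pvFoldB]
  simp only [h1]

lemma pvStepB_take (board : List (List Int)) (ans : Int) (bk : List Int) (cB : List (List Int))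
    (m : Int) (d : Int) (tl : List Int)
    (h1 : PySem.List.pyGetD cB (m - 1) [] = d :: tl) :
    pvFoldB board (ans, bk, cB) m =
    (if bk.getLast? = some d then (ans + 2, bk.dropLast, PySem.List.pySetD cB (m - 1) tl)
     else (ans, bk ++ [d], PySem.List.pySetD cB (m - 1) tl)) := by
  rw [pvFoldB]
  simp only [h1]

lemma pySetD_neg {α : Type} (l : List α) (k : Nat) (v : α) (h0 : 0 < k) (hk : k ≤ l.length) :
    PySem.List.pySetD l (-(k : Int)) v = l.set (l.length - k) v := by
  simp only [PySem.List.pySetD, PySem.List.pySet?, PySem.List.pyIdx?]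
  rw [if_neg (by omega), if_pos (by omega)]
  simp only [Option.map_some, Option.getD_some]
  congr 1
  omega

lemma pyGetD_nil {α : Type} (i : Int) (d : α) : PySem.List.pyGetD ([] : List α) i d = d := by
  simp only [PySem.List.pyGetD, PySem.List.pyGet?, PySem.List.pyIdx?]
  split_ifs <;> simp_all <;> omega

-- resolution of Python's index m-1 (possibly negative) into one slot j, for length-n lists
lemma pvIdx (board : List (List Int)) (m : Int)
    (hlo : 1 - (board.length : Int) ≤ m) (hhi : m ≤ (board.length : Int))
    (hsq : 1 ≤ m ∨ ∀ row ∈ board, row.length = board.length) :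
    ∃ j : Nat, j < board.length ∧
      (∀ (α : Type) (l : List α) (d : α), l.length = board.length →
        PySem.List.pyGetD l (m - 1) d = l[j]?.getD d) ∧
      (∀ (α : Type) (l : List α) (v : α), l.length = board.length →
        PySem.List.pySetD l (m - 1) v = l.set j v) ∧
      (∀ r : Int, pvGet2 board r (m - 1) = pvGet2 board r ((j : Nat) : Int)) := by
  by_cases hm1 : 1 ≤ m
  · set j : Nat := (m - 1).toNat with hjdef
    have hj1 : ((j : Nat) : Int) = m - 1 := by omega
    refine ⟨j, by omega, ?_, ?_, ?_⟩
    · intro α l d hl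
      rw [← hj1, PySem.List.pyGetD_natCast, List.getD]
    · intro α l v hl
      rw [← hj1, PySem.List.pySetD_natCast]
    · intro r
      rw [← hj1]
  · have hsqr : ∀ row ∈ board, row.length = board.length := by
      rcases hsq with h | h
      · exact absurd h hm1
      · exact h
    have hn1 : 1 ≤ board.length := by omega
    set k : Nat := (1 - m).toNat with hkdef
    have hk0 : 0 < k := by omega
    have hkle : k ≤ board.length := by omega
    have hmk : m - 1 = -(k : Int) := by omega
    have hget : ∀ (α : Type) (l : List α) (d : α), l.length = board.length →
        PySem.List.pyGetD l (m - 1) d = l[board.length - k]?.getD d := by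
      intro α l d hl
      rw [hmk, PySem.List.pyGetD_neg_natCast l k d hk0 (by omega)]
      rw [List.getElem?_eq_getElem (by omega)]
      simp only [Option.getD_some, hl]
    refine ⟨board.length - k, by omega, hget, ?_, ?_⟩
    · intro α l v hl
      rw [hmk, pySetD_neg l k v hk0 (by omega), hl]
    · intro r
      rw [pvGet2, pvGet2]
      by_cases hr : PySem.Raise.InRange board.length r
      · have hrow : PySem.List.pyGetD board r ([] : List Int) ∈ board :=
          PySem.List.pyGetD_mem board [] hr
        have hlrow := hsqr _ hrow
        rw [hget Int _ 0 hlrow, PySem.List.pyGetD_natCast, List.getD]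
      · have hnone : PySem.List.pyGetD board r ([] : List Int) = [] :=
          PySem.List.pyGetD_of_none board r [] ((PySem.List.pyGet?_eq_none_iff board r).mpr hr)
        rw [hnone, pyGetD_nil, pyGetD_nil]

lemma pvMove_sim (board : List (List Int)) :
    ∀ (moves : List Int) (ans : Int) (bk : List Int) (hA : List Int) (cB : List (List Int)),
    (∀ m ∈ moves, 1 - (board.length : Int) ≤ m ∧ m ≤ (board.length : Int)) →
    ((∀ m ∈ moves, 1 ≤ m) ∨ (∀ row ∈ board, row.length = board.length)) →
    hA.length = board.length → cB.length = board.length →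
    (∀ j, j < board.length → ∃ kj : Nat, kj ≤ board.length ∧ hA[j]?.getD 0 = (kj : Int) ∧
        cB[j]?.getD [] = (pvCol board j).drop kj) →
    (moves.foldl (pvFoldA board) (ans, bk, hA)).1 =
    (moves.foldl (pvFoldB board) (ans, bk, cB)).1 := by
  intro moves
  induction moves with
  | nil => intro ans bk hA cB _ _ _ _ _; rfl
  | cons m rest ih =>
    intro ans bk hA cB hmv hsq hlA hlB hinv
    have hm := hmv m (List.mem_cons_self)
    have hsqm : 1 ≤ m ∨ ∀ row ∈ board, row.length = board.length := by
      rcases hsq with h | h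
      · exact Or.inl (h m List.mem_cons_self)
      · exact Or.inr h
    obtain ⟨j, hjlt, hget, hset, hdoll⟩ := pvIdx board m hm.1 hm.2 hsqm
    obtain ⟨kj, hkle, hkA, hkB⟩ := hinv j hjlt
    have hgetA : PySem.List.pyGetD hA (m - 1) 0 = (kj : Int) := by
      rw [hget Int hA 0 hlA]; exact hkA
    have hgetB : PySem.List.pyGetD cB (m - 1) [] = (pvCol board j).drop kj := by
      rw [hget (List Int) cB [] hlB]; exact hkB
    have hmvr : ∀ x ∈ rest, 1 - (board.length : Int) ≤ x ∧ x ≤ (board.length : Int) :=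
      fun x hx => hmv x (List.mem_cons_of_mem _ hx)
    have hsqr : (∀ x ∈ rest, 1 ≤ x) ∨ (∀ row ∈ board, row.length = board.length) := by
      rcases hsq with h | h
      · exact Or.inl (fun x hx => h x (List.mem_cons_of_mem _ hx))
      · exact Or.inr h
    rw [List.foldl_cons, List.foldl_cons]
    rcases Nat.lt_or_ge kj board.length with hklt | hkge
    · -- column still has dolls: both sides act
      have hdrop : (pvCol board j).drop kj
          = (pvCol board j)[kj]'(by rw [pvCol_length]; omega) :: (pvCol board j).drop (kj + 1) :=
        List.drop_eq_getElem_cons (by rw [pvCol_length]; omega)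
      have hd : (pvCol board j)[kj]'(by rw [pvCol_length]; omega)
          = pvGet2 board (kj : Int) (m - 1) := by
        have h1 : (pvCol board j)[kj]'(by rw [pvCol_length]; omega)
            = pvGet2 board (kj : Int) ((j : Nat) : Int) := by simp [pvCol]
        rw [h1, hdoll]
      have hgetB' : PySem.List.pyGetD cB (m - 1) []
          = pvGet2 board (kj : Int) (m - 1) :: (pvCol board j).drop (kj + 1) := by
        rw [hgetB, hdrop, hd]
      rw [pvStepA_take board ans bk hA m kj hklt hgetA,
        pvStepB_take board ans bk cB m _ _ hgetB', pvBk_eq]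
      have hsetA : PySem.List.pySetD hA (m - 1) ((kj : Int) + 1) = hA.set j ((kj : Int) + 1) :=
        hset Int hA _ hlA
      have hsetB : PySem.List.pySetD cB (m - 1) ((pvCol board j).drop (kj + 1))
          = cB.set j ((pvCol board j).drop (kj + 1)) :=
        hset (List Int) cB _ hlB
      rw [hsetA, hsetB]
      have hinv' : ∀ j', j' < board.length →
          ∃ kj' : Nat, kj' ≤ board.length ∧
            (hA.set j ((kj : Int) + 1))[j']?.getD 0 = (kj' : Int) ∧
            (cB.set j ((pvCol board j).drop (kj + 1)))[j']?.getD [] = (pvCol board j').drop kj' := by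
        intro j' hj'
        by_cases hjj : j = j'
        · subst hjj
          refine ⟨kj + 1, by omega, ?_, ?_⟩
          · rw [getD_set_self _ _ _ _ (by omega)]; push_cast; ring
          · rw [getD_set_self _ _ _ _ (by omega)]
        · obtain ⟨kj', h1, h2, h3⟩ := hinv j' hj'
          exact ⟨kj', h1, by rw [getD_set_ne _ _ _ _ _ hjj]; exact h2,
            by rw [getD_set_ne _ _ _ _ _ hjj]; exact h3⟩
      by_cases hlast : bk.getLast? = some (pvGet2 board (kj : Int) (m - 1))
      · rw [if_pos hlast, if_pos hlast]
        exact ih (ans + 2) bk.dropLast _ _ hmvr hsqr (by simp [hlA]) (by simp [hlB]) hinv'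
      · rw [if_neg hlast, if_neg hlast]
        exact ih ans (bk ++ [pvGet2 board (kj : Int) (m - 1)]) _ _ hmvr hsqr
          (by simp [hlA]) (by simp [hlB]) hinv'
    · -- exhausted column: both sides skip
      have hkeq : kj = board.length := by omega
      rw [pvStepA_skip board ans bk hA m (by rw [hgetA, hkeq]),
        pvStepB_skip board ans bk cB m
          (by rw [hgetB, hkeq, List.drop_of_length_le (by rw [pvCol_length])])]
      exact ih ans bk hA cB hmvr hsqr hlA hlB hinv

-- the initial heights computed by A's while-loop, slot by slot
lemma pvHeights_port (board : List (List Int)) :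
    (((PySem.List.pyRange 1 ((board.length : Int) + 1) 1).foldl (fun height last =>
        (PySem.List.pyRange 0 (board.length : Int) 1).foldl (fun h a =>
          if PySem.List.pyGetD h a 0 = -1 then
            let h' := if pvGet2 board ((board.length : Int) - last) a = 0 then
                        PySem.List.pySetD h a ((board.length : Int) - last + 1) else h
            if (board.length : Int) - last = 0 ∧
               pvGet2 board ((board.length : Int) - last) a ≠ 0 then
              PySem.List.pySetD h' a 0 else h'
          else h) height)
        (List.replicate board.length (-1))).length = board.length) ∧
    (∀ j, j < board.length →
      ((PySem.List.pyRange 1 ((board.length : Int) + 1) 1).foldl (fun height last =>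
        (PySem.List.pyRange 0 (board.length : Int) 1).foldl (fun h a =>
          if PySem.List.pyGetD h a 0 = -1 then
            let h' := if pvGet2 board ((board.length : Int) - last) a = 0 then
                        PySem.List.pySetD h a ((board.length : Int) - last + 1) else h
            if (board.length : Int) - last = 0 ∧
               pvGet2 board ((board.length : Int) - last) a ≠ 0 then
              PySem.List.pySetD h' a 0 else h'
          else h) height)
        (List.replicate board.length (-1)))[j]?.getD 0 = pvHcol (pvCol board j) board.length) := by
  have hpr1 : PySem.List.pyRange 1 ((board.length : Int) + 1) 1
      = (List.range board.length).map (fun (k : Nat) => 1 + (k : Int)) := by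
    rw [PySem.List.pyRange_one]
    simp only [add_sub_cancel_right, Int.toNat_natCast]
  rw [hpr1, List.foldl_map]
  exact pvOuter_spec board board.length le_rfl

-- B's per-column stack is the fold over the abstract column
lemma pvColStack_eq (board : List (List Int)) (a : Nat) :
    pvColStack board board.length a = pvSfold (pvCol board a) := by
  rw [pvColStack, pvSfold, pvCol, List.foldl_map]

-- ===== VERDICT (by name: the statement is the Claim_ definition above) =====
theorem solution_spec : Claim_equal_solution := by
  unfold Claim_equal_solution
  intro board moves hdom hpre
  unfold Spec_solution
  obtain ⟨hrows, hmv, hcond⟩ := hpre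
  have hsq : (∀ m ∈ moves, 1 ≤ m) ∨ (∀ row ∈ board, row.length = board.length) := by
    by_cases hneg : ∃ m ∈ moves, m ≤ 0
    · exact Or.inr (hcond hneg)
    · push_neg at hneg
      exact Or.inl (fun m hm => by have := hneg m hm; omega)
  rw [solution, solution_alt]
  change (moves.foldl (pvFoldA board) (0, ([], _))).1
      = (moves.foldl (pvFoldB board) (0, ([], _))).1
  obtain ⟨hlenH, hgetH⟩ := pvHeights_port board
  apply pvMove_sim board moves 0 [] _ _ hmv hsq hlenH (by simp)
  intro j hj
  refine ⟨board.length - (pvSfold (pvCol board j)).length, by omega, ?_, ?_⟩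
  · rw [hgetH j hj]
    have := pvHcol_final (pvCol board j) (by rw [pvCol_length]; omega)
    rw [pvCol_length] at this
    rw [this]
  · obtain ⟨hs1, hs2, _, _⟩ := pvSfold_spec (pvCol board j)
    rw [pvCol_length] at hs1 hs2
    have hmap : ((List.range board.length).map
        (fun a => pvColStack board board.length a))[j]?.getD []
        = pvColStack board board.length j := by
      simp [hj]
    rw [hmap, pvColStack_eq]
    exact hs2.symm
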